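-- pv_equiv track=rewrite | github.com/krwhynot/crispy-crm | data/migration-output/name-cleanup/name_cleanup_script.py | parse_name_with_title_suffix
-- ===== SOURCE A (Python) =====
-- from typing import Tuple, Optional, Dict, List
--
-- JOB_TITLES = {
--     'president', 'vice president', 'vp', 'ceo', 'cfo', 'coo',
--     'general manager', 'gm', 'manager', 'executive', 'director',
--     'owner', 'chef', 'executive chef', 'pastry chef', 'corporate chef',
--     'sous chef', 'chef de cuisine', 'coordinator', 'assistant',
--     'supervisor', 'administrator'
-- }
--
-- def is_job_title_keyword(word: str) -> bool:
--     """Check if word is a known job title"""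
--     return word.lower() in JOB_TITLES
--
-- def parse_name_with_title_suffix(name: str) -> Tuple[Optional[str], Optional[str], str]:
--     """Parse 'Seth Minton chef de cuisine' or 'Pastry Chef Schawecker'"""
--     words = name.split()
--
--     # Find where name ends and title begins
--     name_words = []
--     title_words = []
--
--     in_title = False
--     for i, word in enumerate(words):
--         word_lower = word.lower()
--
--         if is_job_title_keyword(word_lower) or word_lower in ['chef', 'pastry', 'executive', 'corporate', 'sous']:
--             in_title = True
--             title_words.append(word)
--         elif in_title:
--             title_words.append(word)
--         elif word[0].isupper():
--             name_words.append(word)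
--
--     if not name_words:
--         # All title words, e.g., "Pastry Chef"
--         return None, None, ' '.join(title_words).title()
--
--     # Extract name
--     if len(name_words) == 1:
--         first, last = None, name_words[0]
--     elif len(name_words) == 2:
--         first, last = name_words[0], name_words[1]
--     else:
--         first, last = name_words[0], name_words[-1]
--
--     title = ' '.join(title_words).title() if title_words else ''
--
--     return first, last, title
-- ===== SOURCE B (Python) =====
-- from typing import Tuple, Optional
--
-- JOB_TITLES = {
--     'president', 'vice president', 'vp', 'ceo', 'cfo', 'coo',
--     'general manager', 'gm', 'manager', 'executive', 'director',
--     'owner', 'chef', 'executive chef', 'pastry chef', 'corporate chef',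
--     'sous chef', 'chef de cuisine', 'coordinator', 'assistant',
--     'supervisor', 'administrator'
-- }
--
-- # any job-title keyword plus the title-prefix modifiers
-- _TRIGGERS = JOB_TITLES | {'pastry', 'corporate', 'sous'}
--
-- def parse_name_with_title_suffix(name: str) -> Tuple[Optional[str], Optional[str], str]:
--     words = name.split()
--     idx = next((i for i, w in enumerate(words) if w.lower() in _TRIGGERS), len(words))
--     title = ' '.join(words[idx:]).title()
--     name_words = [w for w in words[:idx] if w[0].isupper()]
--     if not name_words:
--         return None, None, title
--     first = name_words[0] if len(name_words) > 1 else None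
--     return first, name_words[-1], title
-- ===== Notes on version B (the rewrite author's own statement) =====
-- stated objective: simpler
-- what changed: Replaces the stateful in_title flag loop with a direct computation of the first title-trigger index, then one slice for the title words and one filtered slice for the name words, and collapses the three-way length branch on name_words to first-if-longer-than-one plus last element.
import Mathlib
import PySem

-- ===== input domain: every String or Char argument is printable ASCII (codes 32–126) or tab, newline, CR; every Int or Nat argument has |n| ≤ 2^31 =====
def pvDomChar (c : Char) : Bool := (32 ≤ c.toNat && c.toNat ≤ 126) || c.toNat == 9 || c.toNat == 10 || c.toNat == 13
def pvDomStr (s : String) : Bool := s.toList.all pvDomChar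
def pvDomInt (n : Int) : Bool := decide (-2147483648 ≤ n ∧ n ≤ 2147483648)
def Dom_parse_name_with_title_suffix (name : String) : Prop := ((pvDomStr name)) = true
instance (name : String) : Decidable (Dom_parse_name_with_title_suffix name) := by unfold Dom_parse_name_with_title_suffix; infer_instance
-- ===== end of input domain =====

-- B replaces A's stateful flag-driven loop by a first-trigger-index split with two slice passes; objective: simpler.


-- ===== shared helpers (the module constant and two str-methods both Pythons use) =====
def pvJobTitles : List String :=
  ["president", "vice president", "vp", "ceo", "cfo", "coo",
   "general manager", "gm", "manager", "executive", "director",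
   "owner", "chef", "executive chef", "pastry chef", "corporate chef",
   "sous chef", "chef de cuisine", "coordinator", "assistant",
   "supervisor", "administrator"]

-- word[0].isupper(); words from split() are nonempty, so the none case is unreachable there
def pvUpperInitial (w : String) : Bool :=
  match PySem.List.pyGet? w.toList 0 with
  | some c => PySem.Chars.isupper c
  | none => false

-- str.title(): hand port (no PySem primitive); exact on ASCII, where the cased characters are exactly the letters
def pvTitleChars : List Char → Bool → List Char
  | [], _ => []
  | c :: cs, prevAlpha =>
    if PySem.Chars.isalpha c then
      (if prevAlpha then PySem.Chars.lowerChar c else PySem.Chars.upperChar c) :: pvTitleChars cs true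
    else c :: pvTitleChars cs false

def pvTitle (s : String) : String := String.ofList (pvTitleChars s.toList false)

-- ===== PORT A =====
def pvExtra : List String := ["chef", "pastry", "executive", "corporate", "sous"]

def pvIsJobTitleKeyword (w : String) : Bool := pvJobTitles.contains (PySem.Str.lower w)

def pvStepA (st : List String × List String × Bool) (word : String) : List String × List String × Bool :=
  let wl := PySem.Str.lower word
  if pvIsJobTitleKeyword wl || pvExtra.contains wl then (st.1, st.2.1 ++ [word], true)
  else if st.2.2 then (st.1, st.2.1 ++ [word], st.2.2)
  else if pvUpperInitial word then (st.1 ++ [word], st.2.1, st.2.2)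
  else st

def parse_name_with_title_suffix (name : String) : Option String × Option String × String :=
  let words := PySem.Str.split₀ name
  let st := words.foldl pvStepA ([], [], false)
  let name_words := st.1
  let title_words := st.2.1
  if name_words.isEmpty then
    (none, none, pvTitle (PySem.Str.join " " title_words))
  else
    let fl : Option String × Option String :=
      if name_words.length == 1 then (none, PySem.List.pyGet? name_words 0)
      else if name_words.length == 2 then (PySem.List.pyGet? name_words 0, PySem.List.pyGet? name_words 1)
      else (PySem.List.pyGet? name_words 0, PySem.List.pyGet? name_words (-1))
    let title := if title_words.isEmpty then "" else pvTitle (PySem.Str.join " " title_words)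
    (fl.1, fl.2, title)

-- ===== PORT B =====
def pvTriggers : List String := pvJobTitles ++ ["pastry", "corporate", "sous"]

def pvIsTrigger (w : String) : Bool := pvTriggers.contains (PySem.Str.lower w)

-- next((i for i, w in enumerate(words) if w.lower() in _TRIGGERS), len(words))
def pvFirstTrigIdx : List String → Nat
  | [] => 0
  | w :: ws => if pvIsTrigger w then 0 else pvFirstTrigIdx ws + 1

def parse_name_with_title_suffix_alt (name : String) : Option String × Option String × String :=
  let words := PySem.Str.split₀ name
  let idx := pvFirstTrigIdx words
  -- words[idx:] and words[:idx] with 0 ≤ idx : the Python slices are drop/take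
  let title := pvTitle (PySem.Str.join " " (words.drop idx))
  let name_words := (words.take idx).filter pvUpperInitial
  if name_words.isEmpty then (none, none, title)
  else ((if 1 < name_words.length then PySem.List.pyGet? name_words 0 else none),
        PySem.List.pyGet? name_words (-1), title)

-- ===== PRECONDITION & SPEC =====
def Spec_parse_name_with_title_suffix (name : String) (out : Option String × Option String × String) : Prop := out = parse_name_with_title_suffix_alt name
instance (name : String) (out : Option String × Option String × String) : Decidable (Spec_parse_name_with_title_suffix name out) := by unfold Spec_parse_name_with_title_suffix; infer_instance

-- ===== CLAIM (what is proved, stated in full; the proofs are below) =====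
def Claim_equal_parse_name_with_title_suffix : Prop := ∀ (name : String), Dom_parse_name_with_title_suffix name → Spec_parse_name_with_title_suffix name (parse_name_with_title_suffix name)

-- ===== LEMMAS AND PROOFS =====

-- negation of the trigger predicate, the takeWhile/dropWhile splitting predicate
def pvP (w : String) : Bool := !pvIsTrigger w

theorem pvToNat_ofNat (n : Nat) (h : n.isValidChar) : (Char.ofNat n).toNat = n := by
  simp [Char.ofNat, h, Char.toNat, Char.ofNatAux]

theorem pvLowerChar_idem (c : Char) :
    PySem.Chars.lowerChar (PySem.Chars.lowerChar c) = PySem.Chars.lowerChar c := by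
  unfold PySem.Chars.lowerChar PySem.Chars.isupper
  by_cases h1 : 'A' ≤ c
  · by_cases h2 : c ≤ 'Z'
    · have hZ : c.toNat ≤ 90 := UInt32.le_iff_toNat_le.mp (Char.le_def.mp h2)
      have hv : (c.toNat + 32).isValidChar := by left; omega
      have ht : (Char.ofNat (c.toNat + 32)).toNat = c.toNat + 32 := pvToNat_ofNat _ hv
      have hnot : ¬ ((Char.ofNat (c.toNat + 32)) ≤ 'Z') := by
        rw [Char.le_def]
        intro hle
        have hle' := UInt32.le_iff_toNat_le.mp hle
        have hA : 65 ≤ c.toNat := UInt32.le_iff_toNat_le.mp (Char.le_def.mp h1)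
        have hz' : ('Z' : Char).val.toNat = 90 := by decide
        rw [show ((Char.ofNat (c.toNat + 32)).val.toNat) = c.toNat + 32 from ht] at hle'
        omega
      simp [h1, h2, hnot]
    · simp [h2]
  · simp [h1]

theorem pvStrLower_idem (w : String) :
    PySem.Str.lower (PySem.Str.lower w) = PySem.Str.lower w := by
  unfold PySem.Str.lower PySem.Chars.lower
  simp [List.map_map, Function.comp_def, pvLowerChar_idem]

-- A's word-level condition coincides with B's trigger predicate
theorem pvTrig_eq (word : String) :
    (pvIsJobTitleKeyword (PySem.Str.lower word) || pvExtra.contains (PySem.Str.lower word))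
      = pvIsTrigger word := by
  unfold pvIsJobTitleKeyword pvIsTrigger
  rw [pvStrLower_idem]
  rw [Bool.eq_iff_iff, ← List.contains_append, List.contains_iff_mem, List.contains_iff_mem]
  have h1 : pvJobTitles ++ pvExtra ⊆ pvTriggers := by decide
  have h2 : pvTriggers ⊆ pvJobTitles ++ pvExtra := by decide
  exact ⟨fun h => h1 h, fun h => h2 h⟩

theorem pvLoopA_true (ws : List String) (nw tw : List String) :
    ws.foldl pvStepA (nw, tw, true) = (nw, tw ++ ws, true) := by
  induction ws generalizing tw with
  | nil => simp
  | cons w ws ih =>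
    simp only [List.foldl_cons, pvStepA]
    split_ifs <;> simp [ih]

theorem pvLoopA_false (ws : List String) (nw tw : List String) :
    ws.foldl pvStepA (nw, tw, false) =
      (nw ++ (ws.takeWhile pvP).filter pvUpperInitial,
       tw ++ ws.dropWhile pvP,
       !(ws.dropWhile pvP).isEmpty) := by
  induction ws generalizing nw tw with
  | nil => simp
  | cons w ws ih =>
    by_cases ht : pvIsTrigger w
    · have hc : (pvIsJobTitleKeyword (PySem.Str.lower w) || pvExtra.contains (PySem.Str.lower w)) = true := by
        rw [pvTrig_eq]; exact ht
      simp only [List.foldl_cons, pvStepA, hc, if_true, pvLoopA_true]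
      simp [pvP, ht]
    · have hc : (pvIsJobTitleKeyword (PySem.Str.lower w) || pvExtra.contains (PySem.Str.lower w)) = false := by
        rw [pvTrig_eq]; simp [ht]
      simp only [List.foldl_cons, pvStepA, hc]
      by_cases hu : pvUpperInitial w
      · simp only [hu, if_true, Bool.false_eq_true, if_false, ih]
        simp [pvP, ht, hu]
      · simp only [hu, Bool.false_eq_true, if_false, ih]
        simp [pvP, ht, hu]

theorem pvTake_firstTrig (ws : List String) :
    ws.take (pvFirstTrigIdx ws) = ws.takeWhile pvP := by
  induction ws with
  | nil => rfl
  | cons w ws ih =>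
    by_cases ht : pvIsTrigger w <;>
      simp [pvFirstTrigIdx, pvP, ht, ih]

theorem pvDrop_firstTrig (ws : List String) :
    ws.drop (pvFirstTrigIdx ws) = ws.dropWhile pvP := by
  induction ws with
  | nil => rfl
  | cons w ws ih =>
    by_cases ht : pvIsTrigger w <;>
      simp [pvFirstTrigIdx, pvP, ht, ih]

-- ===== VERDICT (by name: the statement is the Claim_ definition above) =====
theorem parse_name_with_title_suffix_spec : Claim_equal_parse_name_with_title_suffix := by
  intro name _
  unfold Spec_parse_name_with_title_suffix
  unfold parse_name_with_title_suffix parse_name_with_title_suffix_alt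
  simp only [pvLoopA_false, pvTake_firstTrig, pvDrop_firstTrig, List.nil_append]
  generalize ((PySem.Str.split₀ name).takeWhile pvP).filter pvUpperInitial = nw
  generalize (PySem.Str.split₀ name).dropWhile pvP = tw
  have hjoin : pvTitle (PySem.Str.join " " ([] : List String)) = "" := by decide
  rcases nw with _ | ⟨a, _ | ⟨b, _ | ⟨c, rest⟩⟩⟩
  · simp
  · rcases tw with _ | ⟨t, ts⟩ <;>
      norm_num [hjoin, PySem.List.pyGet?, PySem.List.pyIdx?]
  · rcases tw with _ | ⟨t, ts⟩ <;>
      norm_num [hjoin, PySem.List.pyGet?, PySem.List.pyIdx?]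
  · rcases tw with _ | ⟨t, ts⟩ <;>
    · norm_num [hjoin, PySem.List.pyGet?, PySem.List.pyIdx?]
      rw [if_neg (by omega)]
      exact ⟨rfl, rfl⟩
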